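-- pv_equiv track=rewrite | github.com/aakanksha-j/LeetCode | Amazon OA/numberOfProducts.py | numberofProducts
-- ===== SOURCE A (Python) =====
-- def numberofProducts(products):
--     overall_sum = 0
--     for i in range(len(products) - 1, -1, -1):
--         cur_sum = products[i]
--         j = i - 1
--         cur_value = min(products[i] - 1, products[j])
--         while j > -1 and cur_value > 0:
--             cur_sum += cur_value
--             cur_value = min(products[j - 1], cur_value - 1)
--             j -= 1
--         overall_sum = max(overall_sum, cur_sum)
--     return overall_sum
-- ===== SOURCE B (Python) =====
-- def _block_sum(g, lo, hi):
--     # sum of max(0, k + g) for k in [lo, hi]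
--     lo = max(lo, 1 - g)
--     if lo > hi:
--         return 0
--     n = hi - lo + 1
--     return n * (lo + hi) // 2 + n * g
--
--
-- def numberofProducts(products):
--     # One pass with a monotonic stack of blocks (g, width, clipped_sum), where
--     # g = value - index; the stack run-length-encodes the capped staircase
--     # ending at the current position, `total` is its clipped sum.
--     stack = []
--     total = 0
--     best = 0
--     for i, p in enumerate(products):
--         g = p - i
--         cnt = 1
--         while stack and stack[-1][0] >= g:
--             g2, c2, s2 = stack.pop()
--             cnt += c2
--             total -= s2
--         s = _block_sum(g, i - cnt + 1, i)
--         stack.append((g, cnt, s))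
--         total += s
--         if total > best:
--             best = total
--     return best
-- ===== Notes on version B (the rewrite author's own statement) =====
-- stated objective: faster
-- what changed: Replaced the per-index leftward rescan of the capped staircase by a single left-to-right pass with a monotonic stack of (value-index, width, clipped-sum) blocks that maintains the staircase sum incrementally.
import Mathlib
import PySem

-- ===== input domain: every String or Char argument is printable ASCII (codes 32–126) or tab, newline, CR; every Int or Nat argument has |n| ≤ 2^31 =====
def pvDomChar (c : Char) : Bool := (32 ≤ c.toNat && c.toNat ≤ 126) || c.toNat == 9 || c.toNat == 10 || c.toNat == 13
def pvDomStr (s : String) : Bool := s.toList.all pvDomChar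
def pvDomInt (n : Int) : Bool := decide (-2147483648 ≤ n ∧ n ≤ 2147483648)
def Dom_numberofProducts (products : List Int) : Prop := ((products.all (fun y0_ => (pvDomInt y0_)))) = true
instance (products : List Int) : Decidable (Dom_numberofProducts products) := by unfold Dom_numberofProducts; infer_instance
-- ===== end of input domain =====

-- B replaces A's quadratic per-index leftward rescan by one left-to-right pass with a
-- monotonic stack of (value-index, width, clipped-sum) blocks; measured asymptotically faster.

-- ===== PORT A =====
-- the inner `while j > -1 and cur_value > 0` loop of A.
-- `(pyGet? …).getD 0` : every read `products[j-1]` that influences the result has j ≥ 1,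
-- hence is in range on a nonempty list (for j = 0 the wrapped read products[-1] is fed
-- into a call that immediately returns); the default 0 is only a totality guard.
def loopA (products : List Int) (j curSum curValue : Int) : Int :=
  if h : j > -1 ∧ curValue > 0 then
    loopA products (j - 1) (curSum + curValue)
      (min ((PySem.List.pyGet? products (j - 1)).getD 0) (curValue - 1))
  else curSum
termination_by (j + 1).toNat
decreasing_by omega

def numberofProducts (products : List Int) : Int :=
  (PySem.List.pyRange ((products.length : Int) - 1) (-1) (-1)).foldl
    (fun overall_sum i =>
      let cur_sum := (PySem.List.pyGet? products i).getD 0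
      let j := i - 1
      let cur_value := min ((PySem.List.pyGet? products i).getD 0 - 1)
                           ((PySem.List.pyGet? products j).getD 0)
      max overall_sum (loopA products j cur_sum cur_value))
    0

-- ===== PORT B =====
-- sum of max(0, k + g) for k in [lo, hi], via the clipped arithmetic series (Source B _block_sum)
def blockSumB (g lo hi : Int) : Int :=
  let lo' := max lo (1 - g)
  if lo' > hi then 0
  else
    let n := hi - lo' + 1
    PySem.Int.floordiv (n * (lo' + hi)) 2 + n * g

-- the `while stack and stack[-1][0] >= g` pop loop (stack head = Python stack top)
def popB (g : Int) : List (Int × Int × Int) → Int → Int → List (Int × Int × Int) × Int × Int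
  | [], cnt, total => ([], cnt, total)
  | (g2, c2, s2) :: bs, cnt, total =>
    if g2 ≥ g then popB g bs (cnt + c2) (total - s2)
    else ((g2, c2, s2) :: bs, cnt, total)

def stepB (acc : List (Int × Int × Int) × Int × Int) (ip : Int × Int) :
    List (Int × Int × Int) × Int × Int :=
  let g := ip.2 - ip.1
  let r := popB g acc.1 1 acc.2.1
  let s := blockSumB g (ip.1 - r.2.1 + 1) ip.1
  let total := r.2.2 + s
  ((g, r.2.1, s) :: r.1, total, if total > acc.2.2 then total else acc.2.2)

def numberofProducts_alt (products : List Int) : Int :=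
  ((PySem.List.enumerate products).foldl stepB ([], 0, 0)).2.2

-- ===== PRECONDITION & SPEC =====
def Spec_numberofProducts (products : List Int) (out : Int) : Prop := out = numberofProducts_alt products
instance (products : List Int) (out : Int) : Decidable (Spec_numberofProducts products out) := by unfold Spec_numberofProducts; infer_instance

-- ===== CLAIM (what is proved, stated in full; the proofs are below) =====
def Claim_equal_numberofProducts : Prop := ∀ (products : List Int), Dom_numberofProducts products → Spec_numberofProducts products (numberofProducts products)

-- ===== LEMMAS AND PROOFS =====

-- g-value of position k: products[k] - k
def gI (p : List Int) (k : Nat) : Int := p.getD k 0 - (k : Int)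

-- suffix minimum of gI over [k, i]
def suf (p : List Int) (k i : Nat) : Int :=
  if _ : k < i then min (gI p k) (suf p (k + 1) i) else gI p k
termination_by i - k

-- clipped positional sum: Σ max 0 (off + index + value)
def clipT (off : Nat) : List Int → Int
  | [] => 0
  | x :: xs => max 0 ((off : Int) + x) + clipT (off + 1) xs

-- the capped staircase list after the first k elements
def mlist (p : List Int) : Nat → List Int
  | 0 => []
  | k + 1 => (mlist p k).map (fun x => min x (gI p k)) ++ [gI p k]

-- best staircase sum ending at index i
def Tt (p : List Int) (i : Nat) : Int := clipT 0 (mlist p (i + 1))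

def clipS (p : List Int) (i j : Nat) : Int :=
  ((List.range (j + 1)).map (fun k : Nat => max 0 ((k : Int) + suf p k i))).sum

-- block-stack well-formedness: widths ≥ 1, stored sums correct, g-values strictly
-- increasing towards the top (list head)
def GoodS : List (Int × Int × Int) → Prop
  | [] => True
  | (g, c, s) :: bs =>
      1 ≤ c ∧ s = clipT (List.length (GoodS.expand bs)) (List.replicate c.toNat g) ∧
      (∀ x ∈ bs.map (fun b => b.1), x < g) ∧ GoodS bs
where expand : List (Int × Int × Int) → List Int
  | [] => []
  | (g, c, _) :: bs => expand bs ++ List.replicate c.toNat g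

def sumS : List (Int × Int × Int) → Int
  | [] => 0
  | (_, _, s) :: bs => s + sumS bs

-- rising arithmetic series lo + (lo+1) + … (m terms)
def tri : Nat → Int → Int
  | 0, _ => 0
  | m + 1, lo => lo + tri m (lo + 1)

lemma fd2 (a : Int) : PySem.Int.floordiv (2 * a) 2 = a := by
  rw [PySem.Int.floordiv_eq_ediv_of_pos (by omega)]; omega

lemma tri_closed (m : Nat) : ∀ lo : Int,
    tri m lo = PySem.Int.floordiv ((m : Int) * (2 * lo + m - 1)) 2 := by
  induction m with
  | zero =>
    intro lo
    simp [tri]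
  | succ m ih =>
    intro lo
    rcases Int.even_or_odd (m : Int) with ⟨t, ht⟩ | ⟨t, ht⟩
    · have h1 : (m : Int) * (2 * (lo + 1) + (m : Int) - 1) = 2 * (t * (2 * lo + (m : Int) + 1)) := by
        rw [ht]; ring
      have h2 : ((m : Int) + 1) * (2 * lo + ((m : Int) + 1) - 1) = 2 * (t * (2 * lo + (m : Int) + 1) + lo) := by
        rw [ht]; ring
      simp only [tri, ih]
      push_cast
      rw [h1, h2, fd2, fd2]
      ring
    · have h1 : (m : Int) * (2 * (lo + 1) + (m : Int) - 1) = 2 * ((2 * t + 1) * (lo + t + 1)) := by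
        rw [ht]; ring
      have h2 : ((m : Int) + 1) * (2 * lo + ((m : Int) + 1) - 1) = 2 * ((t + 1) * (2 * lo + 2 * t + 1)) := by
        rw [ht]; ring
      simp only [tri, ih]
      push_cast
      rw [h1, h2, fd2, fd2]
      ring

lemma suf_self (p : List Int) (i : Nat) : suf p i i = gI p i := by
  rw [suf]; simp

lemma suf_succ_right (p : List Int) (i : Nat) : ∀ k, k ≤ i →
    suf p k (i + 1) = min (suf p k i) (gI p (i + 1)) := by
  intro k hk
  induction hd : i - k generalizing k with
  | zero =>
    have hk' : k = i := by omega
    subst hk'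
    rw [suf_self, suf, dif_pos (Nat.lt_succ_self _), suf_self]
  | succ n ihn =>
    have hki : k < i := by omega
    have hunf : suf p k i = min (gI p k) (suf p (k + 1) i) := by
      rw [suf, dif_pos hki]
    rw [suf, dif_pos (by omega : k < i + 1), ihn (k + 1) (by omega) (by omega), hunf, min_assoc]

lemma suf_le_step (p : List Int) (k i : Nat) (h : k < i) : suf p k i ≤ suf p (k + 1) i := by
  rw [suf, dif_pos h]; exact min_le_right _ _

lemma suf_mono (p : List Int) (i : Nat) : ∀ j, j ≤ i → ∀ k, k ≤ j →
    (k : Int) + suf p k i ≤ (j : Int) + suf p j i := by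
  intro j
  induction j with
  | zero => intro _ k hk; interval_cases k; exact le_refl _
  | succ j ih =>
    intro hj k hk
    rcases Nat.eq_or_lt_of_le hk with he | hlt
    · subst he; exact le_refl _
    · have h1 := ih (by omega) k (by omega)
      have h2 := suf_le_step p j i (by omega)
      push_cast
      push_cast at h1
      omega

lemma length_mlist (p : List Int) : ∀ k, (mlist p k).length = k := by
  intro k
  induction k with
  | zero => rfl
  | succ k ih => simp [mlist, ih]

lemma mlist_succ (p : List Int) (k : Nat) :
    mlist p (k + 1) = (mlist p k).map (fun x => min x (gI p k)) ++ [gI p k] := rfl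

lemma mlist_get? (p : List Int) : ∀ i k, k ≤ i →
    (mlist p (i + 1))[k]? = some (suf p k i) := by
  intro i
  induction i with
  | zero =>
    intro k hk
    interval_cases k
    simp [mlist, suf_self]
  | succ i ih =>
    intro k hk
    rcases Nat.eq_or_lt_of_le hk with he | hlt
    · subst he
      rw [mlist_succ, List.getElem?_append_right (by simp [length_mlist])]
      simp [length_mlist, suf_self]
    · have hk' : k ≤ i := by omega
      rw [mlist_succ, List.getElem?_append_left (by simp [length_mlist]; omega),
          List.getElem?_map, ih k hk', suf_succ_right p i k hk']
      rfl

lemma mlist_getD (p : List Int) : ∀ i k, k ≤ i →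
    (mlist p (i + 1)).getD k 0 = suf p k i := by
  intro i k hk
  rw [List.getD_eq_getElem?_getD, mlist_get? p i k hk]
  rfl

lemma clipT_append (a : List Int) : ∀ (b : List Int) (off : Nat),
    clipT off (a ++ b) = clipT off a + clipT (off + a.length) b := by
  induction a with
  | nil => intro b off; simp [clipT]
  | cons x xs ih =>
    intro b off
    simp only [List.cons_append, clipT, ih, List.length_cons]
    rw [show off + (xs.length + 1) = off + 1 + xs.length by omega]
    ring

lemma clipT_eq_sum (l : List Int) : ∀ off : Nat,
    clipT off l = ((List.range l.length).map
      (fun k => max 0 (((off : Int) + k) + l.getD k 0))).sum := by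
  induction l with
  | nil => intro off; simp [clipT]
  | cons x xs ih =>
    intro off
    simp only [clipT, List.length_cons, List.range_succ_eq_map, List.map_cons, List.map_map,
      List.sum_cons, ih (off + 1)]
    refine congrArg₂ (· + ·) (by norm_num) ?_
    apply congrArg
    apply List.map_congr_left
    intro a _
    simp only [Function.comp_apply, List.getD_cons_succ]
    push_cast
    ring_nf


lemma Tt_eq_clipS (p : List Int) (i : Nat) : Tt p i = clipS p i i := by
  unfold Tt clipS
  rw [clipT_eq_sum, length_mlist]
  apply congrArg
  apply List.map_congr_left
  intro k hk
  rw [mlist_getD p i k (by simpa using Nat.lt_succ_iff.mp (List.mem_range.mp hk))]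
  norm_num

lemma clipS_nonpos (p : List Int) (i j : Nat) (hj : j ≤ i)
    (h : (j : Int) + suf p j i ≤ 0) : clipS p i j = 0 := by
  unfold clipS
  apply List.sum_eq_zero
  intro x hx
  rcases List.mem_map.mp hx with ⟨k, hk, rfl⟩
  have hkj : k ≤ j := Nat.lt_succ_iff.mp (List.mem_range.mp hk)
  have := suf_mono p i j hj k hkj
  omega

lemma clipS_nonneg (p : List Int) (i j : Nat) : 0 ≤ clipS p i j := by
  apply List.sum_nonneg
  intro x hx
  rcases List.mem_map.mp hx with ⟨k, _, rfl⟩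
  exact le_max_left _ _

lemma loopA_neg (p : List Int) (s v : Int) : loopA p (-1) s v = s := by
  rw [loopA]; simp

lemma clipS_succ (p : List Int) (i j : Nat) :
    clipS p i (j + 1) = clipS p i j + max 0 (((j : Int) + 1) + suf p (j + 1) i) := by
  unfold clipS
  rw [List.range_succ, List.map_append, List.sum_append]
  simp

lemma loopA_eq (p : List Int) (i : Nat) : ∀ j, j ≤ i → ∀ s,
    loopA p (j : Int) s ((j : Int) + suf p j i) = s + clipS p i j := by
  intro j
  induction j with
  | zero =>
    intro _ s
    by_cases hv : (0 : Int) + suf p 0 i > 0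
    · rw [loopA, dif_pos ⟨by omega, by exact_mod_cast hv⟩,
          show (((0 : Nat) : Int) - 1) = -1 by norm_num, loopA_neg]
      have : clipS p i 0 = max 0 ((0 : Int) + suf p 0 i) := by
        unfold clipS; simp
      push_cast
      omega
    · rw [loopA, dif_neg (by push_cast; omega)]
      rw [clipS_nonpos p i 0 (by omega) (by omega)]
      omega
  | succ j ih =>
    intro hj s
    have hji : j < i := by omega
    have hsuf : suf p j i = min (gI p j) (suf p (j + 1) i) := by
      rw [suf, dif_pos hji]
    by_cases hv : ((j : Int) + 1) + suf p (j + 1) i > 0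
    · rw [loopA, dif_pos ⟨by push_cast; omega, by push_cast; omega⟩]
      push_cast
      rw [show ((j : Int) + 1 - 1) = (j : Int) by ring]
      have hget : (PySem.List.pyGet? p ((j : Nat) : Int)).getD 0 = p.getD j 0 := by
        rw [PySem.List.pyGet?_natCast, List.getD_eq_getElem?_getD]
      rw [show min ((PySem.List.pyGet? p ((j : Nat) : Int)).getD 0)
            ((j : Int) + 1 + suf p (j + 1) i - 1) = (j : Int) + suf p j i by
        rw [hget, hsuf]; unfold gI; omega]
      rw [ih (by omega), clipS_succ]
      omega
    · rw [loopA, dif_neg (by push_cast; omega)]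
      rw [clipS_nonpos p i (j + 1) hj (by push_cast; omega)]
      omega

-- A's body at index i equals Tt p i up to clipping at 0
lemma bodyA_eq (p : List Int) (i : Nat) :
    max 0 (loopA p ((i : Int) - 1) (p.getD i 0)
      (min (p.getD i 0 - 1) ((PySem.List.pyGet? p ((i : Int) - 1)).getD 0)))
    = max 0 (Tt p i) := by
  have hgdef : ∀ k : Nat, gI p k = p.getD k 0 - (k : Int) := fun _ => rfl
  cases i with
  | zero =>
    rw [show (((0 : Nat) : Int) - 1) = -1 by norm_num, loopA_neg]
    have : Tt p 0 = max 0 (0 + gI p 0) + 0 := rfl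
    rw [this, hgdef]
    push_cast
    omega
  | succ j =>
    have hji : (((j + 1 : Nat) : Int) - 1) = ((j : Nat) : Int) := by push_cast; ring
    rw [hji]
    have hsufj : suf p j (j + 1) = min (gI p j) (gI p (j + 1)) := by
      rw [suf, dif_pos (Nat.lt_succ_self j), suf_self]
    rw [show min (p.getD (j + 1) 0 - 1) ((PySem.List.pyGet? p ((j : Nat) : Int)).getD 0)
          = (j : Int) + suf p j (j + 1) by
      rw [PySem.List.pyGet?_natCast, ← List.getD_eq_getElem?_getD, hsufj, hgdef, hgdef]
      push_cast
      omega]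
    rw [loopA_eq p (j + 1) j (by omega), Tt_eq_clipS, clipS_succ, suf_self, hgdef]
    have hS := clipS_nonneg p (j + 1) j
    have hmono := suf_mono p (j + 1) (j + 1) (le_refl _) j (by omega)
    rw [suf_self, hgdef] at hmono
    by_cases ha : 0 < p.getD (j + 1) 0
    · push_cast
      push_cast at hmono
      omega
    · have hz : clipS p (j + 1) j = 0 := by
        apply clipS_nonpos p (j + 1) j (by omega)
        push_cast at hmono ⊢
        omega
      rw [hz]
      push_cast
      push_cast at hmono
      omega

lemma foldl_max_out {α : Type} (f : α → Int) : ∀ (l : List α) (a c : Int),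
    l.foldl (fun o x => max o (f x)) (max a c) = max (l.foldl (fun o x => max o (f x)) a) c := by
  intro l
  induction l with
  | nil => intro a c; rfl
  | cons x xs ih =>
    intro a c
    simp only [List.foldl_cons]
    rw [max_right_comm, ih]

lemma foldl_max_rev {α : Type} (f : α → Int) : ∀ (l : List α) (a : Int),
    l.reverse.foldl (fun o x => max o (f x)) a = l.foldl (fun o x => max o (f x)) a := by
  intro l
  induction l with
  | nil => intro a; rfl
  | cons x xs ih =>
    intro a
    simp only [List.reverse_cons, List.foldl_append, List.foldl_cons, List.foldl_nil]
    rw [ih, ← foldl_max_out]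

lemma foldl_max_congr {α : Type} (f g : α → Int) : ∀ (l : List α) (a : Int), 0 ≤ a →
    (∀ x ∈ l, max 0 (f x) = max 0 (g x)) →
    l.foldl (fun o x => max o (f x)) a = l.foldl (fun o x => max o (g x)) a := by
  intro l
  induction l with
  | nil => intro a _ _; rfl
  | cons x xs ih =>
    intro a ha h
    simp only [List.foldl_cons]
    have hx := h x (by simp)
    have : max a (f x) = max a (g x) := by
      rw [show max a (f x) = max a (max 0 (f x)) by rw [max_def, max_def (0:Int)]; split_ifs <;> omega,
          hx, show max a (max 0 (g x)) = max a (g x) by rw [max_def (0:Int), max_def]; split_ifs <;> omega]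
    rw [this]
    exact ih (max a (g x)) (le_trans ha (le_max_left _ _)) (fun y hy => h y (by simp [hy]))

-- A computes the max over i of the clipped staircase sums
lemma portA_eq (p : List Int) :
    numberofProducts p = (List.range p.length).foldl (fun o k => max o (Tt p k)) 0 := by
  unfold numberofProducts
  rw [PySem.List.pyRange_neg_one_eq_reverse,
      show (-1 + 1 : Int) = 0 by norm_num,
      show ((p.length : Int) - 1 + 1) = (p.length : Int) by ring,
      PySem.List.pyRange_zero_natCast]
  rw [← List.map_reverse, List.foldl_map]
  rw [foldl_max_rev (fun k : Nat => loopA p ((k : Int) - 1) ((PySem.List.pyGet? p (k : Int)).getD 0)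
        (min ((PySem.List.pyGet? p (k : Int)).getD 0 - 1)
             ((PySem.List.pyGet? p ((k : Int) - 1)).getD 0))) (List.range p.length) 0]
  apply foldl_max_congr _ _ _ _ (le_refl 0)
  intro k _
  rw [show (PySem.List.pyGet? p (k : Int)).getD 0 = p.getD k 0 by
    rw [PySem.List.pyGet?_natCast, List.getD_eq_getElem?_getD]]
  exact bodyA_eq p k

-- ==== B side ====

lemma goodS_expand_mem : ∀ st : List (Int × Int × Int), ∀ x ∈ GoodS.expand st, x ∈ st.map (fun b => b.1) := by
  intro st
  induction st with
  | nil => intro x hx; simp [GoodS.expand] at hx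
  | cons b bs ih =>
    rcases b with ⟨g, c, s⟩
    intro x hx
    rcases List.mem_append.mp hx with h | h
    · simp [ih x h]
    · simp [List.eq_of_mem_replicate h]

lemma sumS_eq_clipT : ∀ st, GoodS st → sumS st = clipT 0 (GoodS.expand st) := by
  intro st
  induction st with
  | nil => intro _; rfl
  | cons b bs ih =>
    rcases b with ⟨g, c, s⟩
    intro hg
    rcases hg with ⟨_, hs, _, hbs⟩
    show s + sumS bs = clipT 0 (GoodS.expand bs ++ List.replicate c.toNat g)
    rw [clipT_append, ih hbs, hs, Nat.zero_add]
    ring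

lemma clipT_replicate_pos (g : Int) : ∀ (m off : Nat), 0 < (off : Int) + g →
    clipT off (List.replicate m g) = tri m ((off : Int) + g) := by
  intro m
  induction m with
  | zero => intro off _; rfl
  | succ m ih =>
    intro off hpos
    rw [List.replicate_succ]
    show max 0 ((off : Int) + g) + clipT (off + 1) (List.replicate m g) = _
    rw [ih (off + 1) (by push_cast; omega)]
    show _ = (off : Int) + g + tri m ((off : Int) + g + 1)
    rw [show (((off + 1 : Nat)) : Int) + g = (off : Int) + g + 1 by push_cast; ring]
    omega

lemma fd_shift (x c : Int) : PySem.Int.floordiv (x + 2 * c) 2 = PySem.Int.floordiv x 2 + c := by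
  rw [PySem.Int.floordiv_eq_ediv_of_pos (by omega), PySem.Int.floordiv_eq_ediv_of_pos (by omega)]
  omega

lemma blockSum_clipT (g : Int) : ∀ (m off : Nat),
    clipT off (List.replicate m g) = blockSumB g (off : Int) ((off : Int) + m - 1) := by
  intro m
  induction m with
  | zero =>
    intro off
    unfold blockSumB
    rw [if_pos (by push_cast; omega : max (off : Int) (1 - g) > (off : Int) + (0 : Nat) - 1)]
    rfl
  | succ m ih =>
    intro off
    by_cases hpos : 0 < (off : Int) + g
    · rw [clipT_replicate_pos g (m + 1) off hpos]
      unfold blockSumB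
      rw [show max ((off : Int)) (1 - g) = (off : Int) by omega]
      rw [if_neg (by push_cast; omega)]
      rw [tri_closed]
      have harg : ((m + 1 : Nat) : Int) * (2 * ((off : Int) + g) + ((m + 1 : Nat) : Int) - 1)
          = ((off : Int) + ((m + 1 : Nat) : Int) - 1 - (off : Int) + 1) * ((off : Int) + ((off : Int) + ((m + 1 : Nat) : Int) - 1))
            + 2 * ((((off : Int) + ((m + 1 : Nat) : Int) - 1 - (off : Int) + 1)) * g) := by
        push_cast; ring
      rw [harg, fd_shift]
    · have hstep : clipT off (List.replicate (m + 1) g) = clipT (off + 1) (List.replicate m g) := by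
        rw [List.replicate_succ]
        show max 0 ((off : Int) + g) + clipT (off + 1) (List.replicate m g) = _
        omega
      rw [hstep, ih (off + 1)]
      unfold blockSumB
      rw [show max (((off + 1 : Nat)) : Int) (1 - g) = 1 - g by push_cast; omega,
          show max ((off : Int)) (1 - g) = 1 - g by omega,
          show (((off + 1 : Nat)) : Int) + (m : Int) - 1 = (off : Int) + ((m + 1 : Nat) : Int) - 1 by push_cast; ring]

lemma popB_spec (g : Int) : ∀ (st : List (Int × Int × Int)) (cnt total : Int), GoodS st →
    ∃ r : List Int,
      GoodS.expand st = GoodS.expand (popB g st cnt total).1 ++ r ∧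
      (∀ x ∈ r, g ≤ x) ∧
      (∀ x ∈ (popB g st cnt total).1.map (fun b => b.1), x < g) ∧
      GoodS (popB g st cnt total).1 ∧
      (popB g st cnt total).2.1 = cnt + r.length ∧
      (popB g st cnt total).2.2 = total - (sumS st - sumS (popB g st cnt total).1) := by
  intro st
  induction st with
  | nil =>
    intro cnt total _
    exact ⟨[], by simp [popB, GoodS.expand], by simp, by simp [popB],
      trivial, by simp [popB], by simp [popB, sumS]⟩
  | cons b bs ih =>
    rcases b with ⟨g2, c2, s2⟩
    intro cnt total hg
    rcases hg with ⟨hc2, hs2, hlt, hbs⟩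
    by_cases hge : g2 ≥ g
    · have hpop : popB g ((g2, c2, s2) :: bs) cnt total = popB g bs (cnt + c2) (total - s2) := by
        simp only [popB, if_pos hge]
      obtain ⟨r, he, hr, hkeep, hgood, hcnt, htot⟩ := ih (cnt + c2) (total - s2) hbs
      rw [hpop]
      refine ⟨r ++ List.replicate c2.toNat g2, ?_, ?_, hkeep, hgood, ?_, ?_⟩
      · show GoodS.expand bs ++ List.replicate c2.toNat g2 = _
        rw [he, List.append_assoc]
      · intro x hx
        rcases List.mem_append.mp hx with h | h
        · exact hr x h
        · rw [List.eq_of_mem_replicate h]; exact hge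
      · rw [hcnt]
        simp only [List.length_append, List.length_replicate]
        push_cast
        omega
      · rw [htot]
        show _ = total - (s2 + sumS bs - _)
        omega
    · have hpop : popB g ((g2, c2, s2) :: bs) cnt total = ((g2, c2, s2) :: bs, cnt, total) := by
        simp only [popB, if_neg hge]
      rw [hpop]
      refine ⟨[], by simp, by simp, ?_, ⟨hc2, hs2, hlt, hbs⟩, by simp, by simp⟩
      intro x hx
      rcases List.mem_cons.mp hx with h | h
      · simp at h; omega
      · have := hlt x h
        omega

def InvB (p : List Int) (i : Nat) (st : List (Int × Int × Int) × Int × Int) : Prop :=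
  GoodS st.1 ∧ GoodS.expand st.1 = mlist p i ∧ st.2.1 = sumS st.1 ∧
  st.2.2 = (List.range i).foldl (fun o k => max o (Tt p k)) 0

lemma stepB_inv (p : List Int) (i : Nat) (x : Int) (hx : p.getD i 0 = x)
    (st : List (Int × Int × Int) × Int × Int) (h : InvB p i st) :
    InvB p (i + 1) (stepB st ((i : Int), x)) := by
  obtain ⟨hG, hE, hT, hB⟩ := h
  have hgi : gI p i = x - (i : Int) := by
    show p.getD i 0 - (i : Int) = _
    omega
  obtain ⟨r, he, hr, hkeep, hgood, hcnt, htot⟩ := popB_spec (x - (i : Int)) st.1 1 st.2.1 hG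
  set P := popB (x - (i : Int)) st.1 1 st.2.1 with hP
  set s := blockSumB (x - (i : Int)) ((i : Int) - P.2.1 + 1) (i : Int) with hsdef
  have hstep : stepB st ((i : Int), x)
      = ((x - (i : Int), P.2.1, s) :: P.1, P.2.2 + s,
         if P.2.2 + s > st.2.2 then P.2.2 + s else st.2.2) := rfl
  have hlenE : (GoodS.expand st.1).length = i := by rw [hE, length_mlist]
  have hlen : (GoodS.expand P.1).length + r.length = i := by
    have := congrArg List.length he
    simp only [List.length_append] at this
    omega
  have hcntTo : P.2.1.toNat = r.length + 1 := by omega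
  have hs : s = clipT (GoodS.expand P.1).length (List.replicate P.2.1.toNat (x - (i : Int))) := by
    rw [blockSum_clipT (x - (i : Int)) P.2.1.toNat (GoodS.expand P.1).length, hsdef]
    rw [show ((GoodS.expand P.1).length : Int) = (i : Int) - P.2.1 + 1 by omega,
        show ((i : Int) - P.2.1 + 1) + (P.2.1.toNat : Int) - 1 = (i : Int) by omega]
  have hmap1 : (GoodS.expand P.1).map (fun y => min y (x - (i : Int))) = GoodS.expand P.1 := by
    have hid : ∀ a ∈ GoodS.expand P.1, min a (x - (i : Int)) = id a := by
      intro a ha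
      have := hkeep a (goodS_expand_mem P.1 a ha)
      simp
      omega
    rw [List.map_congr_left hid, List.map_id]
  have hmap2 : r.map (fun y => min y (x - (i : Int))) = List.replicate r.length (x - (i : Int)) := by
    have hall : ∀ b ∈ r.map (fun y => min y (x - (i : Int))), b = x - (i : Int) := by
      intro b hb
      rcases List.mem_map.mp hb with ⟨a, ha, rfl⟩
      have := hr a ha
      simp
      omega
    have := List.eq_replicate_of_mem hall
    rwa [List.length_map] at this
  have hEx : GoodS.expand ((x - (i : Int), P.2.1, s) :: P.1) = mlist p (i + 1) := by
    show GoodS.expand P.1 ++ List.replicate P.2.1.toNat (x - (i : Int)) = _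
    rw [mlist_succ, hgi, ← hE, he, List.map_append, hmap1, hmap2, hcntTo,
        List.replicate_succ', List.append_assoc]
  have hGnew : GoodS ((x - (i : Int), P.2.1, s) :: P.1) :=
    ⟨by omega, hs, hkeep, hgood⟩
  have hTt : Tt p i = P.2.2 + s := by
    unfold Tt
    rw [← hEx, ← sumS_eq_clipT _ hGnew]
    show s + sumS P.1 = _
    omega
  rw [hstep]
  refine ⟨hGnew, hEx, ?_, ?_⟩
  · show P.2.2 + s = s + sumS P.1
    omega
  · show (if P.2.2 + s > st.2.2 then P.2.2 + s else st.2.2)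
        = (List.range (i + 1)).foldl (fun o k => max o (Tt p k)) 0
    rw [List.range_succ, List.foldl_append]
    show _ = max ((List.range i).foldl (fun o k => max o (Tt p k)) 0) (Tt p i)
    rw [← hB, hTt]
    split_ifs <;> omega

lemma foldB (p : List Int) : ∀ (l : List Int) (i : Nat), p.drop i = l →
    ∀ st, InvB p i st →
    InvB p (i + l.length) ((PySem.List.enumerate l (i : Int)).foldl stepB st) := by
  intro l
  induction l with
  | nil =>
    intro i _ st h
    simpa [PySem.List.enumerate_nil] using h
  | cons x xs ih =>
    intro i hd st h
    have hx : p.getD i 0 = x := by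
      have : p[i]? = some x := by
        have := List.getElem?_drop (xs := p) (i := i) (j := 0)
        rw [hd] at this
        simpa using this.symm
      rw [List.getD_eq_getElem?_getD, this]
      rfl
    have hd' : p.drop (i + 1) = xs := by
      rw [← List.tail_drop, hd]
      rfl
    rw [PySem.List.enumerate_cons, List.foldl_cons,
        show ((i : Int) + 1) = (((i + 1 : Nat)) : Int) by push_cast; ring]
    have := ih (i + 1) hd' (stepB st ((i : Int), x)) (stepB_inv p i x hx st h)
    rw [show i + (x :: xs).length = (i + 1) + xs.length by simp; omega]
    exact this

lemma portB_eq (p : List Int) :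
    numberofProducts_alt p = (List.range p.length).foldl (fun o k => max o (Tt p k)) 0 := by
  have h0 : InvB p 0 ([], 0, 0) := ⟨trivial, rfl, rfl, rfl⟩
  have := foldB p p 0 rfl ([], 0, 0) h0
  rw [show ((0 : Nat) : Int) = (0 : Int) by norm_num, Nat.zero_add] at this
  exact this.2.2.2

-- ===== VERDICT (by name: the statement is the Claim_ definition above) =====
theorem numberofProducts_spec : Claim_equal_numberofProducts := by
  intro products _
  unfold Spec_numberofProducts
  rw [portA_eq, portB_eq]
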